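-- pv_equiv track=rewrite | github.com/khalid-imran/learn-python | Week 1/06 assignement 1/C_Good_Sequence.py | good_sequence
-- ===== SOURCE A (Python) =====
-- from collections import Counter
--
-- def good_sequence(val, int_list):
--
--     frq = Counter(int_list)
--     rm = 0
--
--     for i, count in frq.items():
--         if count > i:
--             rm = rm + count - i
--         elif count < i:
--             rm = rm + count
--
--     return rm
-- ===== SOURCE B (Python) =====
-- def good_sequence(val, int_list):
--     # Alternative: sort and scan consecutive runs instead of building a Counter.
--     s = sorted(int_list)
--     total = 0
--     i = 0
--     n = len(s)
--     while i < n: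
--         v = s[i]
--         j = i
--         while j < n and s[j] == v:
--             j += 1
--         c = j - i
--         total += c - v if c >= v else c
--         i = j
--     return total
-- ===== Notes on version B (the rewrite author's own statement) =====
-- stated objective: alternative
-- what changed: Replaces A's Counter (hash multiset) pass with sorting the list and scanning consecutive equal runs, adding each run's contribution from its length.
import Mathlib
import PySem

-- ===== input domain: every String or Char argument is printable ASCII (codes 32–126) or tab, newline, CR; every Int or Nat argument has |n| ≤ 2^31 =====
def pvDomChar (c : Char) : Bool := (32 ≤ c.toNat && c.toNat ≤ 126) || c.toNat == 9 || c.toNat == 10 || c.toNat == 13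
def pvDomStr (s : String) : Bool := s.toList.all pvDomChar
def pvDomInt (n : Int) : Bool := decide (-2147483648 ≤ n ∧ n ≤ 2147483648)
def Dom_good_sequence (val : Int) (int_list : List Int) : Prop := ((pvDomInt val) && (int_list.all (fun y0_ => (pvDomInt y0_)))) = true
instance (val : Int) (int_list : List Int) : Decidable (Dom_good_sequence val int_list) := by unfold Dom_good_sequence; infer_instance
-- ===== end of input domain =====

-- B replaces A's Counter hash-count pass by sorting the list and scanning consecutive
-- runs (run length = the value's multiplicity); same return value, alternative algorithm.

-- ===== PORT A =====
def good_sequence (val : Int) (int_list : List Int) : Int :=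
  let frq := PySem.Dict.counter int_list
  frq.items.foldl
    (fun rm p =>
      if p.2 > p.1 then rm + p.2 - p.1
      else if p.2 < p.1 then rm + p.2
      else rm) 0

-- ===== PORT B =====
-- the outer while loop of Source B: each step consumes one run of equal values
-- (the inner 'while s[j] == v' scan is the takeWhile, advancing i to j is the dropWhile)
def goodRuns : List Int → Int
  | [] => 0
  | v :: rest =>
      let c : Int := 1 + ((rest.takeWhile (fun x => x == v)).length : Int)
      (if c ≥ v then c - v else c) + goodRuns (rest.dropWhile (fun x => x == v))
termination_by l => l.length
decreasing_by
  simp only [List.length_cons]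
  exact Nat.lt_succ_of_le (List.length_dropWhile_le _ _)

def good_sequence_alt (val : Int) (int_list : List Int) : Int :=
  goodRuns (PySem.List.sorted int_list (fun x => x) false)

-- ===== PRECONDITION & SPEC =====
def Spec_good_sequence (val : Int) (int_list : List Int) (out : Int) : Prop := out = good_sequence_alt val int_list
instance (val : Int) (int_list : List Int) (out : Int) : Decidable (Spec_good_sequence val int_list out) := by unfold Spec_good_sequence; infer_instance

-- ===== CLAIM (what is proved, stated in full; the proofs are below) =====
def Claim_equal_good_sequence : Prop := ∀ (val : Int) (int_list : List Int), Dom_good_sequence val int_list → Spec_good_sequence val int_list (good_sequence val int_list)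

-- ===== LEMMAS AND PROOFS =====

-- contribution of one distinct value v with multiplicity c, in A's branch order
def fA (v c : Int) : Int := if c > v then c - v else if c < v then c else 0

-- the common characterisation: sum of fA over the distinct values with their counts
def distSum (l : List Int) : Int :=
  ((PySem.Set.ofList l).map (fun v => fA v ((l.count v : Int)))).sum

lemma fA_eq_ite (v c : Int) : fA v c = if c ≥ v then c - v else c := by
  unfold fA; split_ifs <;> omega

lemma good_sequence_eq_distSum (val : Int) (xs : List Int) :
    good_sequence val xs = distSum xs := by
  unfold good_sequence distSum
  show (PySem.Dict.counter xs).items.foldl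
      (fun rm p =>
        if p.2 > p.1 then rm + p.2 - p.1
        else if p.2 < p.1 then rm + p.2
        else rm) 0 = _
  rw [show (fun (rm : Int) (p : Int × Int) =>
        if p.2 > p.1 then rm + p.2 - p.1
        else if p.2 < p.1 then rm + p.2
        else rm) = fun rm p => rm + fA p.1 p.2 from by
      funext rm p; unfold fA; split_ifs <;> omega]
  rw [PySem.Dict.items_counter, List.foldl_map,
      PySem.List.foldl_add (g := fun k => fA k ((xs.count k : Int)))]
  simp

lemma foldl_add_keeps_head (v : Int) (t : List Int) (s : List Int) (hv : v ∉ t) :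
    t.foldl PySem.Set.add (v :: s) = v :: t.foldl PySem.Set.add s := by
  induction t generalizing s with
  | nil => rfl
  | cons x t ih =>
    have hx : x ≠ v := fun h => hv (h ▸ List.mem_cons_self)
    have hv' : v ∉ t := fun h => hv (List.mem_cons_of_mem _ h)
    simp only [List.foldl_cons]
    have hadd : PySem.Set.add (v :: s) x = v :: PySem.Set.add s x := by
      simp only [PySem.Set.add, PySem.Set.contains, List.contains_cons]
      have hxv : (x == v) = false := by simp [hx]
      rw [hxv]
      simp only [Bool.false_or]
      split <;> rfl
    rw [hadd]
    exact ih _ hv'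

lemma ofList_replicate_append (c : Nat) (hc : 0 < c) (v : Int) (t : List Int) (hv : v ∉ t) :
    PySem.Set.ofList (List.replicate c v ++ t) = v :: PySem.Set.ofList t := by
  have h1 : (List.replicate c v).foldl PySem.Set.add ([] : List Int) = [v] := by
    induction c with
    | zero => omega
    | succ n ih =>
      rcases Nat.eq_zero_or_pos n with h | h
      · subst h; rfl
      · rw [List.replicate_succ', List.foldl_append, ih h]
        simp [PySem.Set.add, PySem.Set.contains]
  show (List.replicate c v ++ t).foldl PySem.Set.add [] = _
  rw [List.foldl_append, h1, foldl_add_keeps_head v t [] hv]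
  rfl

-- structure of a sorted list: the head's duplicates form its prefix
lemma sorted_head_run (v : Int) (rest : List Int)
    (hs : (v :: rest).Pairwise (· ≤ ·)) :
    rest.takeWhile (fun x => x == v) = List.replicate (rest.count v) v ∧
    v ∉ rest.dropWhile (fun x => x == v) := by
  have hrest : rest.Pairwise (· ≤ ·) := hs.of_cons
  have hdrop : v ∉ rest.dropWhile (fun x => x == v) := by
    intro hmem
    set t := rest.dropWhile (fun x => x == v) with ht
    have hts : t.Pairwise (· ≤ ·) := List.Pairwise.sublist (List.dropWhile_sublist _) hrest
    cases hteq : t with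
    | nil => simp [hteq] at hmem
    | cons x t' =>
      have hxv : ¬ ((fun x => x == v) x = true) := by
        have := List.head?_dropWhile_not (fun x => x == v) rest
        rw [← ht, hteq] at this; simpa using this
      simp only [beq_iff_eq] at hxv
      have hxrest : x ∈ rest := (List.dropWhile_sublist _).mem (by rw [← ht, hteq]; exact List.mem_cons_self)
      have hvx : v ≤ x := (List.pairwise_cons.mp hs).1 x hxrest
      rw [hteq] at hmem hts
      rcases List.mem_cons.mp hmem with h | h
      · exact hxv h.symm
      · have : x ≤ v := (List.pairwise_cons.mp hts).1 v h
        exact hxv (le_antisymm this hvx)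
  refine ⟨?_, hdrop⟩
  have htake : ∀ x ∈ rest.takeWhile (fun x => x == v), x = v := by
    intro x hx
    have := List.mem_takeWhile_imp hx
    simpa using this
  have hcount : rest.count v = (rest.takeWhile (fun x => x == v)).length := by
    have hsplit : rest = rest.takeWhile (fun x => x == v) ++ rest.dropWhile (fun x => x == v) :=
      (List.takeWhile_append_dropWhile).symm
    have h0 : (rest.dropWhile (fun x => x == v)).count v = 0 := List.count_eq_zero.mpr hdrop
    have h1 : (rest.takeWhile (fun x => x == v)).count v = (rest.takeWhile (fun x => x == v)).length := by
      apply List.count_eq_length.mpr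
      intro x hx; exact ((htake x hx) ▸ rfl)
    calc rest.count v = (rest.takeWhile (fun x => x == v)).count v
          + (rest.dropWhile (fun x => x == v)).count v := by
            conv_lhs => rw [hsplit]
            exact List.count_append ..
      _ = _ := by rw [h0, h1]; omega
  rw [hcount]
  exact List.eq_replicate_length.mpr htake

lemma goodRuns_eq_distSum (l : List Int) (hs : l.Pairwise (· ≤ ·)) :
    goodRuns l = distSum l := by
  induction l using goodRuns.induct with
  | case1 => simp [goodRuns, distSum, PySem.Set.ofList]
  | case2 v rest ih =>
    obtain ⟨htake, hdrop⟩ := sorted_head_run v rest hs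
    set t := rest.dropWhile (fun x => x == v) with ht
    set k := rest.count v with hk
    have hsplit : rest = List.replicate k v ++ t := by
      conv_lhs => rw [← List.takeWhile_append_dropWhile (p := fun x => x == v) (l := rest)]
      rw [htake]
    have hts : t.Pairwise (· ≤ ·) := List.Pairwise.sublist (List.dropWhile_sublist _) hs.of_cons
    have hihres := ih hts
    have hlen : ((rest.takeWhile (fun x => x == v)).length : Int) = (k : Int) := by
      rw [htake]; simp
    rw [goodRuns]
    show (if 1 + ((rest.takeWhile (fun x => x == v)).length : Int) ≥ v then
            1 + ((rest.takeWhile (fun x => x == v)).length : Int) - v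
          else 1 + ((rest.takeWhile (fun x => x == v)).length : Int)) + goodRuns t = distSum (v :: rest)
    rw [hlen, hihres, ← fA_eq_ite]
    -- now compute distSum (v :: rest)
    have hshape : v :: rest = List.replicate (k + 1) v ++ t := by
      rw [hsplit]; rfl
    unfold distSum
    have hcv : ((List.replicate (k + 1) v ++ t).count v : Int) = (k : Int) + 1 := by
      rw [List.count_append, List.count_replicate, List.count_eq_zero.mpr hdrop]
      simp
    rw [hshape, ofList_replicate_append (k + 1) (Nat.succ_pos k) v t hdrop,
        List.map_cons, List.sum_cons, hcv]
    have htail : (PySem.Set.ofList t).map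
          (fun u => fA u (((List.replicate (k + 1) v ++ t).count u : Int)))
        = (PySem.Set.ofList t).map (fun u => fA u ((t.count u : Int))) := by
      apply List.map_congr_left
      intro u hu
      have hut : u ∈ t := (PySem.Set.mem_ofList t u).mp hu
      have huv : u ≠ v := fun h => hdrop (h ▸ hut)
      have : (List.replicate (k + 1) v ++ t).count u = t.count u := by
        rw [List.count_append, List.count_replicate]
        simp [(Ne.symm huv : v ≠ u)]
      rw [this]
    rw [htail, show (1 : Int) + (k : Int) = (k : Int) + 1 from by ring]

lemma distSum_perm (l₁ l₂ : List Int) (h : l₁.Perm l₂) : distSum l₁ = distSum l₂ := by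
  unfold distSum
  have hmemiff : ∀ a, a ∈ PySem.Set.ofList l₁ ↔ a ∈ PySem.Set.ofList l₂ := by
    intro a
    rw [PySem.Set.mem_ofList, PySem.Set.mem_ofList]
    exact ⟨fun hx => h.mem_iff.mp hx, fun hx => h.mem_iff.mpr hx⟩
  have hperm : (PySem.Set.ofList l₁).Perm (PySem.Set.ofList l₂) :=
    (List.perm_ext_iff_of_nodup (PySem.Set.nodup_ofList l₁) (PySem.Set.nodup_ofList l₂)).mpr hmemiff
  have hcong : (PySem.Set.ofList l₁).map (fun v => fA v ((l₁.count v : Int)))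
      = (PySem.Set.ofList l₁).map (fun v => fA v ((l₂.count v : Int))) := by
    apply List.map_congr_left
    intro u _
    rw [h.count_eq]
  rw [hcong]
  exact (hperm.map _).sum_eq

-- ===== VERDICT (by name: the statement is the Claim_ definition above) =====
theorem good_sequence_spec : Claim_equal_good_sequence := by
  intro val int_list _
  show good_sequence val int_list = good_sequence_alt val int_list
  rw [good_sequence_eq_distSum]
  unfold good_sequence_alt
  rw [goodRuns_eq_distSum _ (by simpa using PySem.List.sorted_pairwise int_list (fun x => x))]
  exact (distSum_perm _ _ (PySem.List.sorted_perm int_list (fun x => x) false)).symm
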